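-- pv_equiv track=rewrite | github.com/pablopalacios23/LORE_sa | lore_sa/client_utils/cumple_regla.py | decode_anchor_conditions
-- ===== SOURCE A (Python) =====
-- def decode_anchor_conditions(conds, row, feature_names):
--
--     row_dict = dict(zip(feature_names, row))
--     cat_values = {}
--
--     for f, v in row_dict.items():
--
--         if "_" in f:
--             base, cat = f.split("_", 1)
--
--             if v == 1:
--                 cat_values[base] = cat
--
--     decoded = []
--
--     for c in conds:
--
--         if "_" in c:
--
--             var = c.split()[0]
--
--             if "_" in var:
--
--                 base, cat = var.split("_", 1)
--
--                 if base in cat_values: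
--                     decoded.append(f"{base} = {cat_values[base]}")
--                     continue
--
--         decoded.append(c)
--
--     return decoded
-- ===== SOURCE B (Python) =====
-- def decode_anchor_conditions(conds, row, feature_names):
--     row_items = list(dict(zip(feature_names, row)).items())
--
--     def active_cat(base):
--         # last feature of form f"{base}_{cat}" whose value is 1, if any
--         prefix = base + "_"
--         cat = None
--         for f, v in row_items:
--             if v == 1 and f.startswith(prefix):
--                 cat = f[len(prefix):]
--         return cat
--
--     out = []
--     for c in conds:
--         repl = None
--         if "_" in c:
--             var = c.split()[0]
--             if "_" in var:
--                 base = var.split("_", 1)[0]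
--                 cat = active_cat(base)
--                 if cat is not None:
--                     repl = f"{base} = {cat}"
--         out.append(c if repl is None else repl)
--     return out
-- ===== Notes on version B (the rewrite author's own statement) =====
-- stated objective: alternative
-- what changed: B drops A's precomputed base->category dict (cat_values); instead, for each condition it scans the deduplicated (feature, value) pairs on demand for the last active one-hot with the matching base prefix.
import Mathlib
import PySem

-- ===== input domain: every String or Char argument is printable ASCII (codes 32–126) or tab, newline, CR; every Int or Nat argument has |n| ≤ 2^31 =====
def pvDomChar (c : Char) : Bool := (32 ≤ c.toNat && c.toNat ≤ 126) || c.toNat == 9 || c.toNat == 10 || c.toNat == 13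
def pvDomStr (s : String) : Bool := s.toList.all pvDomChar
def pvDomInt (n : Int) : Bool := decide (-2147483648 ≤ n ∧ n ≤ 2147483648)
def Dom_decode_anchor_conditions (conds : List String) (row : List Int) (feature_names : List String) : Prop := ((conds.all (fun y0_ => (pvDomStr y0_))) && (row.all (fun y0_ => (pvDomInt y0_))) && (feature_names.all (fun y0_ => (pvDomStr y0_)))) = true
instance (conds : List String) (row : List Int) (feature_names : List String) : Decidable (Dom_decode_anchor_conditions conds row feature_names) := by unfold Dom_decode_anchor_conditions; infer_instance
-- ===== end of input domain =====

-- B replaces A's precomputed base->category dict by an on-demand scan of the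
-- deduplicated (feature, value) pairs per condition (alternative decomposition, same results).

-- ===== PORT A =====

-- f.split("_", 1) as a pair; exact whenever '_' ∈ f (the only case the ports use it in)
def pvSplitU1 (f : List Char) : List Char × List Char :=
  (f.takeWhile (· ≠ '_'), (f.dropWhile (· ≠ '_')).drop 1)

def decode_anchor_conditions (conds : List String) (row : List Int) (feature_names : List String) : List String :=
  -- row_dict = dict(zip(feature_names, row))
  let row_dict : PySem.Dict String Int := PySem.Dict.ofList (feature_names.zip row)
  -- cat_values loop over row_dict.items()
  let cat_values : PySem.Dict (List Char) (List Char) :=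
    row_dict.items.foldl (fun cv fv =>
      if fv.1.toList.contains '_' then          -- '"_" in f' (single-char needle: substring = membership)
        let bc := pvSplitU1 fv.1.toList
        if fv.2 == 1 then cv.insert bc.1 bc.2 else cv
      else cv) PySem.Dict.empty
  -- decoded loop over conds
  conds.foldl (fun decoded c =>
    if c.toList.contains '_' then               -- '"_" in c'
      let var := (PySem.Str.split₀ c).headD ""  -- c.split()[0]; nonempty here since c holds '_', a non-space char
      if var.toList.contains '_' then
        let bc := pvSplitU1 var.toList
        if cat_values.contains bc.1 then
          decoded ++ [String.ofList (bc.1 ++ " = ".toList ++ cat_values.getD bc.1 [])]   -- f"{base} = {cat_values[base]}"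
        else decoded ++ [c]
      else decoded ++ [c]
    else decoded ++ [c]) []

-- ===== PORT B =====

-- helper active_cat of Source B: last (f, v) with v == 1 and f.startswith(base + "_"), giving f[len(base+"_"):]
def pvActiveCat (items : List (String × Int)) (base : List Char) : Option (List Char) :=
  items.foldl (fun cat fv =>
    if fv.2 == 1 && PySem.Chars.startswith fv.1.toList (base ++ ['_']) then
      some (fv.1.toList.drop (base ++ ['_']).length)   -- f[len(prefix):], nonnegative slice = drop
    else cat) none

def decode_anchor_conditions_alt (conds : List String) (row : List Int) (feature_names : List String) : List String :=
  let row_items : List (String × Int) := (PySem.Dict.ofList (feature_names.zip row)).items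
  conds.foldl (fun out c =>
    let repl : Option String :=
      if c.toList.contains '_' then
        let var := (PySem.Str.split₀ c).headD ""       -- c.split()[0]; nonempty here since c holds '_'
        if var.toList.contains '_' then
          let base := var.toList.takeWhile (· ≠ '_')   -- var.split("_", 1)[0]
          match pvActiveCat row_items base with
          | some cat => some (String.ofList (base ++ " = ".toList ++ cat))
          | none => none
        else none
      else none
    match repl with
    | some s => out ++ [s]
    | none => out ++ [c]) []

-- ===== PRECONDITION & SPEC =====
def Spec_decode_anchor_conditions (conds : List String) (row : List Int) (feature_names : List String) (out : List String) : Prop := out = decode_anchor_conditions_alt conds row feature_names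
instance (conds : List String) (row : List Int) (feature_names : List String) (out : List String) : Decidable (Spec_decode_anchor_conditions conds row feature_names out) := by unfold Spec_decode_anchor_conditions; infer_instance

-- ===== CLAIM (what is proved, stated in full; the proofs are below) =====
def Claim_equal_decode_anchor_conditions : Prop := ∀ (conds : List String) (row : List Int) (feature_names : List String), Dom_decode_anchor_conditions conds row feature_names → Spec_decode_anchor_conditions conds row feature_names (decode_anchor_conditions conds row feature_names)

-- ===== LEMMAS AND PROOFS =====

theorem pvFoldlCongr {A B : Type} (f g : A -> B -> A) (h : ∀ a b, f a b = g a b)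
    (l : List B) (init : A) : l.foldl f init = l.foldl g init := by
  induction l generalizing init with
  | nil => rfl
  | cons b t ih => simp only [List.foldl_cons, h]; exact ih _

-- the underscore-free part before the first '_' is recovered by takeWhile
theorem pvTakeWhileBase (base rest : List Char) (hb : '_' ∉ base) :
    (base ++ '_' :: rest).takeWhile (· ≠ '_') = base := by
  induction base with
  | nil => simp
  | cons a t ih =>
    simp only [List.mem_cons, not_or] at hb
    have ha : a ≠ '_' := fun h => hb.1 h.symm
    rw [List.cons_append, List.takeWhile_cons, if_pos (by simpa using ha), ih hb.2]

-- a list containing '_' decomposes as takeWhile ++ '_' :: (dropWhile …).drop 1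
theorem pvDecomp (f : List Char) (hf : '_' ∈ f) :
    f = f.takeWhile (· ≠ '_') ++ '_' :: (f.dropWhile (· ≠ '_')).drop 1 := by
  induction f with
  | nil => cases hf
  | cons a t ih =>
    by_cases ha : a = '_'
    · subst ha; simp
    · have ht : '_' ∈ t := by
        cases hf with
        | head => exact absurd rfl ha
        | tail _ h => exact h
      simpa [List.takeWhile_cons, List.dropWhile_cons, ha] using ih ht

theorem pvNotMemTakeWhile (f : List Char) : '_' ∉ f.takeWhile (· ≠ '_') := by
  intro h
  have := List.mem_takeWhile_imp h
  simp at this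

-- prefix uniqueness: if base ++ "_" prefixes f and both relevant bases are underscore-free, they agree
theorem pvBaseEq (base t₁ t₂ : List Char) (hb : '_' ∉ base) (h1 : '_' ∉ t₁)
    (hp : (base ++ ['_']) <+: (t₁ ++ '_' :: t₂)) : base = t₁ := by
  obtain ⟨r, hr⟩ := hp
  have h2 : (t₁ ++ '_' :: t₂).takeWhile (· ≠ '_') = t₁ := pvTakeWhileBase t₁ t₂ h1
  have h3 : (t₁ ++ '_' :: t₂).takeWhile (· ≠ '_') = base := by
    rw [← hr, List.append_assoc]
    simpa using pvTakeWhileBase base r hb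
  rw [h2] at h3
  exact h3.symm

-- one step of B's scan equals the dict lookup after one step of A's cat_values loop
theorem pvDropHelp (b t : List Char) : (b ++ '_' :: t).drop (b ++ ['_']).length = t := by
  rw [show b ++ '_' :: t = (b ++ ['_']) ++ t by simp]
  exact List.drop_left

-- one step of B's scan equals the dict lookup after one step of A's cat_values loop
theorem pvStep (base : List Char) (hb : '_' ∉ base) (f : List Char) (v : Int)
    (d : PySem.Dict (List Char) (List Char)) (o : Option (List Char)) (h : o = d.get? base) :
    (if v == 1 && PySem.Chars.startswith f (base ++ ['_']) then
        some (f.drop (base ++ ['_']).length) else o)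
    = ((if f.contains '_' then
          let bc := pvSplitU1 f
          if v == 1 then d.insert bc.1 bc.2 else d
        else d)).get? base := by
  by_cases hc : f.contains '_'
  · have hmem : '_' ∈ f := List.contains_iff_mem.mp hc
    have hdec := pvDecomp f hmem
    have h1 := pvNotMemTakeWhile f
    simp only [pvSplitU1, hc, if_true]
    revert hdec h1
    generalize f.takeWhile (· ≠ '_') = t₁
    generalize (f.dropWhile (· ≠ '_')).drop 1 = t₂
    intro hdec h1
    subst hdec
    by_cases hv : v == 1
    · by_cases hbase : base = t₁
      · subst hbase
        have hpre : PySem.Chars.startswith (base ++ '_' :: t₂) (base ++ ['_']) = true := by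
          rw [PySem.Chars.startswith_iff]
          exact ⟨t₂, by simp⟩
        simp only [hv, hpre, Bool.and_self, if_true, pvDropHelp]
        exact (PySem.Dict.get?_insert_self d base t₂).symm
      · have hpre : PySem.Chars.startswith (t₁ ++ '_' :: t₂) (base ++ ['_']) = false := by
          rw [Bool.eq_false_iff]
          intro hs
          exact hbase (pvBaseEq base t₁ t₂ hb h1 ((PySem.Chars.startswith_iff _ _).mp hs))
        simp only [hv, hpre, Bool.and_false, if_true]
        rw [PySem.Dict.get?_insert_of_ne d _ hbase]
        exact h
    · simp only [hv, Bool.false_and]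
      exact h
  · have hmem : '_' ∉ f := fun hm => hc (List.contains_iff_mem.mpr hm)
    have hpre : PySem.Chars.startswith f (base ++ ['_']) = false := by
      rw [Bool.eq_false_iff]
      intro hs
      exact hmem (((PySem.Chars.startswith_iff _ _).mp hs).subset (by simp))
    simp only [hc, hpre, Bool.and_false]
    exact h

-- the loop invariant: B's scan accumulator equals the lookup in A's cat_values dict
theorem pvActiveCatInv (base : List Char) (hb : '_' ∉ base)
    (l : List (String × Int)) (d : PySem.Dict (List Char) (List Char))
    (o : Option (List Char)) (h : o = d.get? base) :
    l.foldl (fun cat fv =>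
      if fv.2 == 1 && PySem.Chars.startswith fv.1.toList (base ++ ['_']) then
        some (fv.1.toList.drop (base ++ ['_']).length)
      else cat) o
    = (l.foldl (fun cv fv =>
        if fv.1.toList.contains '_' then
          let bc := pvSplitU1 fv.1.toList
          if fv.2 == 1 then cv.insert bc.1 bc.2 else cv
        else cv) d).get? base := by
  induction l generalizing d o with
  | nil => simpa using h
  | cons fv t ih =>
    apply ih
    exact pvStep base hb fv.1.toList fv.2 d o h

-- ===== VERDICT (by name: the statement is the Claim_ definition above) =====
theorem decode_anchor_conditions_spec : Claim_equal_decode_anchor_conditions := by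
  intro conds row fn _
  unfold Spec_decode_anchor_conditions decode_anchor_conditions decode_anchor_conditions_alt
  apply pvFoldlCongr
  intro decoded c
  by_cases hcb : c.toList.contains '_' = true
  · by_cases hvb : ((PySem.Str.split₀ c).headD "").toList.contains '_' = true
    · rw [if_pos hcb, if_pos hcb, if_pos hvb, if_pos hvb]
      have hb : '_' ∉ ((PySem.Str.split₀ c).headD "").toList.takeWhile (· ≠ '_') :=
        pvNotMemTakeWhile _
      have hkey2 : pvActiveCat (PySem.Dict.ofList (fn.zip row)).items
          (((PySem.Str.split₀ c).headD "").toList.takeWhile (· ≠ '_')) = _ :=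
        pvActiveCatInv _ hb (PySem.Dict.ofList (fn.zip row)).items PySem.Dict.empty none
          (PySem.Dict.get?_empty _).symm
      dsimp only
      have hsp : (pvSplitU1 ((PySem.Str.split₀ c).headD "").toList).1
          = ((PySem.Str.split₀ c).headD "").toList.takeWhile (· ≠ '_') := rfl
      rw [hsp, PySem.Dict.contains_eq_isSome_get?, ← hkey2]
      cases hO : pvActiveCat (PySem.Dict.ofList (fn.zip row)).items
          (((PySem.Str.split₀ c).headD "").toList.takeWhile (· ≠ '_')) with
      | none => simp
      | some cat =>
        rw [PySem.Dict.getD_eq_get?_getD, ← hkey2, hO]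
        simp
    · rw [if_pos hcb, if_pos hcb, if_neg hvb, if_neg hvb]
  · rw [if_neg hcb, if_neg hcb]
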